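-- pv_equiv track=rewrite | github.com/StackPie71/LINGI2364-Mining-Patterns | Project 2 Sequence Mining/q2.py | get_seq_itemset2
-- ===== SOURCE A (Python) =====
-- def get_seq_itemset2(data1, data2):
--     seq_data1 = []
--     seq_data2 = []
--     tmp1 = []
--     tmp2 = []
--     itemset = []
--     # seq_data1
--     for line in data1:
--         if (len(line) <= 1) or (line[0] == ' '):
--             if len(tmp1) != 0:
--                 seq_data1.append(tmp1)
--                 tmp1 = []
--         else:
--             tmp1.append(line[0])
--             if line[0] not in itemset:
--                 itemset.append(line[0])
--     # seq_data2
--     for line in data2: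
--         if (len(line) <= 1) or (line[0] == ' '):
--             if len(tmp2) != 0:
--                 seq_data2.append(tmp2)
--                 tmp2 = []
--         else:
--             tmp2.append(line[0])
--             if line[0] not in itemset:
--                 itemset.append(line[0])
--
--     itemset = sorted(itemset)
--     return itemset, seq_data1, seq_data2
-- ===== SOURCE B (Python) =====
-- def get_seq_itemset2(data1, data2):
--     def is_data(line):
--         return len(line) > 1 and line[0] != ' '
--
--     def sequences(data):
--         seqs = []
--         start = 0
--         for i, line in enumerate(data):
--             if not is_data(line):
--                 if start < i:
--                     seqs.append([l[0] for l in data[start:i]])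
--                 start = i + 1
--         return seqs
--
--     firsts = [l[0] for l in data1 if is_data(l)] + [l[0] for l in data2 if is_data(l)]
--     itemset = sorted(set(firsts))
--     return itemset, sequences(data1), sequences(data2)
-- ===== Notes on version B (the rewrite author's own statement) =====
-- stated objective: simpler
-- what changed: Replaces A's flush-accumulator loops with interleaved itemset maintenance by index/slice runs emitted at each delimiter plus a separate one-pass comprehension deduplicated with set() for the itemset.
import Mathlib
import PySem

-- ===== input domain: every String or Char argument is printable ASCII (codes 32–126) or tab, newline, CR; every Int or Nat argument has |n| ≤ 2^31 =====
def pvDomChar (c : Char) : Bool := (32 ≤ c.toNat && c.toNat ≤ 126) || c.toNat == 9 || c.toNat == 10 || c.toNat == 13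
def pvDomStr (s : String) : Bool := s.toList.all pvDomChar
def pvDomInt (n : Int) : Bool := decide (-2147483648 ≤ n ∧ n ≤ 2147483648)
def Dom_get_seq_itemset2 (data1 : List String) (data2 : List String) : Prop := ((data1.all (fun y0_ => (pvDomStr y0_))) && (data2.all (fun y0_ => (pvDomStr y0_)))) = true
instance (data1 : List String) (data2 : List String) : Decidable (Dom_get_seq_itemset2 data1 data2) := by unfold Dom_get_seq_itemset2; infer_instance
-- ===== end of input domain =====

-- B replaces A's interleaved flush-accumulator loops by delimiter-indexed slice emission plus a
-- separate filter/set/sorted pass for the itemset (objective: simpler decomposition, same values).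

-- line[0] as a one-character Python string ("" is unreachable: both ports use it only on lines
-- whose length guard has passed); shared accessor
def pvFirst (s : String) : String :=
  match PySem.Str.pyGet? s 0 with
  | some c => String.mk [c]
  | none => ""

-- ===== PORT A =====

-- one iteration of A's loop body; state = (seq_data, tmp, itemset)
def pvStepA (st : List (List String) × List String × List String) (line : String) :
    List (List String) × List String × List String :=
  if decide (PySem.Str.len line ≤ 1) || (pvFirst line == " ") then
    if st.2.1.length != 0 then (st.1 ++ [st.2.1], [], st.2.2) else st
  else
    (st.1, st.2.1 ++ [pvFirst line],
      if st.2.2.contains (pvFirst line) then st.2.2 else st.2.2 ++ [pvFirst line])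

def get_seq_itemset2 (data1 : List String) (data2 : List String) : List String × List (List String) × List (List String) :=
  let s1 := data1.foldl pvStepA ([], [], [])
  let s2 := data2.foldl pvStepA ([], [], s1.2.2)
  (PySem.List.sorted s2.2.2 (fun x => x) false, s1.1, s2.1)

-- ===== PORT B =====
def pvIsData (line : String) : Bool :=
  decide (1 < PySem.Str.len line) && !(pvFirst line == " ")

-- one iteration of B's sequences() loop; state = (seqs, start), p = (i, line) from enumerate
def pvStepB (data : List String) (st : List (List String) × Int) (p : Int × String) :
    List (List String) × Int :=
  if pvIsData p.2 then st
  else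
    ((if st.2 < p.1 then st.1 ++ [(PySem.List.slice data (some st.2) (some p.1)).map pvFirst] else st.1),
      p.1 + 1)

def pvSequencesB (data : List String) : List (List String) :=
  ((PySem.List.enumerate data 0).foldl (pvStepB data) ([], 0)).1

def get_seq_itemset2_alt (data1 : List String) (data2 : List String) : List String × List (List String) × List (List String) :=
  let firsts := (data1.filter pvIsData).map pvFirst ++ (data2.filter pvIsData).map pvFirst
  (PySem.List.sorted (PySem.Set.ofList firsts) (fun x => x) false,
    pvSequencesB data1, pvSequencesB data2)

-- ===== PRECONDITION & SPEC =====
def Spec_get_seq_itemset2 (data1 : List String) (data2 : List String) (out : List String × List (List String) × List (List String)) : Prop := out = get_seq_itemset2_alt data1 data2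
instance (data1 : List String) (data2 : List String) (out : List String × List (List String) × List (List String)) : Decidable (Spec_get_seq_itemset2 data1 data2 out) := by unfold Spec_get_seq_itemset2; infer_instance

-- ===== CLAIM (what is proved, stated in full; the proofs are below) =====
def Claim_equal_get_seq_itemset2 : Prop := ∀ (data1 : List String) (data2 : List String), Dom_get_seq_itemset2 data1 data2 → Spec_get_seq_itemset2 data1 data2 (get_seq_itemset2 data1 data2)

-- ===== LEMMAS AND PROOFS =====

-- A's delimiter test is the negation of B's data-line test
lemma pvNotData (line : String) :
    (decide (PySem.Str.len line ≤ 1) || (pvFirst line == " ")) = !pvIsData line := by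
  simp [pvIsData, pvFirst]
  simp [← decide_not]

-- common recursive description of the emitted sequences (trailing run is dropped, as in both programs)
def pvAux (tmp : List String) : List String → List (List String)
  | [] => []
  | l :: ls =>
    if pvIsData l then pvAux (tmp ++ [pvFirst l]) ls
    else if tmp.length != 0 then tmp :: pvAux [] ls else pvAux [] ls

def pvLastTmp (tmp : List String) : List String → List String
  | [] => tmp
  | l :: ls => if pvIsData l then pvLastTmp (tmp ++ [pvFirst l]) ls else pvLastTmp [] ls

lemma pvAfold (data : List String) :
    ∀ (seq : List (List String)) (tmp iset : List String),
      data.foldl pvStepA (seq, tmp, iset)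
        = (seq ++ pvAux tmp data, pvLastTmp tmp data,
            PySem.Set.update iset ((data.filter pvIsData).map pvFirst)) := by
  induction data with
  | nil => intro seq tmp iset; simp [pvAux, pvLastTmp, PySem.Set.update]
  | cons l ls ih =>
    intro seq tmp iset
    rw [List.foldl_cons]
    by_cases h : pvIsData l = true
    · have hs : pvStepA (seq, tmp, iset) l
          = (seq, tmp ++ [pvFirst l], PySem.Set.add iset (pvFirst l)) := by
        unfold pvStepA
        rw [pvNotData]
        simp [h, PySem.Set.add]
      rw [hs, ih]
      simp [pvAux, pvLastTmp, h, PySem.Set.update, pvFirst]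
    · have h' : pvIsData l = false := by simpa using h
      by_cases ht : tmp = []
      · have hs : pvStepA (seq, tmp, iset) l = (seq, tmp, iset) := by
          unfold pvStepA
          rw [pvNotData]
          simp [h', ht]
        rw [hs, ih]
        simp [pvAux, pvLastTmp, h', ht]
      · have hs : pvStepA (seq, tmp, iset) l = (seq ++ [tmp], [], iset) := by
          unfold pvStepA
          rw [pvNotData]
          simp [h', ht]
        rw [hs, ih]
        simp [pvAux, pvLastTmp, h', ht]

-- invariant of B's index loop: start ≤ k, the lines data[start:k] are the pending (all-data) run
lemma pvBfold (data : List String) :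
    ∀ (rest : List String) (k start : Nat) (seqs : List (List String)),
      start ≤ k → data.drop k = rest →
      ((PySem.List.enumerate rest (k : Int)).foldl (pvStepB data) (seqs, (start : Int))).1
        = seqs ++ pvAux (((data.drop start).take (k - start)).map pvFirst) rest := by
  intro rest
  induction rest with
  | nil => intro k start seqs _ _; simp [PySem.List.enumerate, pvAux]
  | cons l rest' ih =>
    intro k start seqs hsk hdrop
    have hk : k < data.length := by
      have := congrArg List.length hdrop
      simp [List.length_drop] at this
      omega
    have hget : data[k]? = some l := by
      have h0 : (data.drop k)[0]? = data[k + 0]? := List.getElem?_drop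
      rw [hdrop] at h0
      simpa using h0.symm
    have hdrop' : data.drop (k + 1) = rest' := by
      have : data.drop (k + 1) = (data.drop k).drop 1 := by
        rw [List.drop_drop]
      rw [this, hdrop]
      rfl
    rw [PySem.List.enumerate_cons, List.foldl_cons]
    by_cases hd : pvIsData l = true
    · have hs : pvStepB data (seqs, (start : Int)) ((k : Int), l) = (seqs, (start : Int)) := by
        simp [pvStepB, hd]
      rw [hs]
      have hcast : ((k : Int) + 1) = ((k + 1 : Nat) : Int) := by push_cast; ring
      rw [hcast, ih (k + 1) start seqs (by omega) hdrop']
      have htake : (data.drop start).take (k + 1 - start) = (data.drop start).take (k - start) ++ [l] := by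
        have hidx : (data.drop start)[k - start]? = some l := by
          rw [List.getElem?_drop]
          rwa [Nat.add_sub_cancel' hsk]
        have : k + 1 - start = (k - start) + 1 := by omega
        rw [this, List.take_succ, hidx]
        rfl
      rw [htake]
      simp [pvAux, hd]
    · have hd' : pvIsData l = false := by simpa using hd
      have hslice : PySem.List.slice data (some (start : Int)) (some (k : Int))
          = (data.drop start).take (k - start) := PySem.List.slice_natCast data start k
      have hlen : (((data.drop start).take (k - start)).map pvFirst).length = k - start := by
        simp [List.length_take, List.length_drop]
        omega
      have hcast : ((k : Int) + 1) = ((k + 1 : Nat) : Int) := by push_cast; ring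
      have hs : pvStepB data (seqs, (start : Int)) ((k : Int), l)
          = ((if start < k then seqs ++ [((data.drop start).take (k - start)).map pvFirst] else seqs),
              ((k + 1 : Nat) : Int)) := by
        simp only [pvStepB, hd', Bool.false_eq_true, if_false, hslice, hcast, Nat.cast_lt]
      rw [hs, hcast]
      by_cases hlt : start < k
      · rw [if_pos hlt]
        rw [ih (k + 1) (k + 1) _ (le_refl _) hdrop']
        simp [pvAux, hd', List.append_assoc]
        omega
      · rw [if_neg hlt]
        rw [ih (k + 1) (k + 1) _ (le_refl _) hdrop']
        have h0 : k - start = 0 := by omega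
        simp [pvAux, hd', h0]

lemma pvSequencesB_eq (data : List String) : pvSequencesB data = pvAux [] data := by
  have h := pvBfold data data 0 0 [] (le_refl 0) rfl
  simpa [pvSequencesB] using h

-- ===== VERDICT (by name: the statement is the Claim_ definition above) =====
theorem get_seq_itemset2_spec : Claim_equal_get_seq_itemset2 := by
  intro data1 data2 _
  unfold Spec_get_seq_itemset2 get_seq_itemset2 get_seq_itemset2_alt
  simp only [pvAfold]
  simp [pvSequencesB_eq, PySem.Set.ofList_eq_foldl, PySem.Set.update, List.foldl_append]
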